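-- pv_equiv track=rewrite | github.com/Kemoler/SI-Security | task2.py | calculate
-- ===== SOURCE A (Python) =====
-- def calculate(m: int, n: int, p: list[int]):
--     if m == -1:  # Акция закончилась
--         return 0
--     if n == len(p):  # Акция началась
--         return calculate(m - 1, 0, p)
--     if n == len(p) - 1:  # Получили все n наград
--         return calculate(m - 1, 0, p) + p[n]
--     return max(calculate(m - 1, 0, p),
--                calculate(m - 1, n + 1, p) + p[n])  # Пропускаем день или получаем его вознаграждение
-- ===== SOURCE B (Python) =====
-- def calculate(m: int, n: int, p: list[int]):
--     # Bottom-up DP: row[i] holds the best reward reachable from state (days, i);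
--     # one row per remaining-days value replaces A's exponential branching recursion.
--     L = len(p)
--     row = [0] * (L + 1)
--     for _ in range(m + 1):
--         g = row[0]
--         row = [g if i == L
--                else g + p[L - 1] if i == L - 1
--                else max(g, row[i + 1] + p[i])
--                for i in range(L + 1)]
--     return row[n]
-- ===== Notes on version B (the rewrite author's own statement) =====
-- stated objective: alternative
-- what changed: Replaces the two-branch recursion over (m,n) states with a bottom-up DP that rebuilds one reward row per remaining-day count.
-- outside the precondition, e.g. on calculate(1, -1, [5, 3]): A returns 8, B returns 5
import Mathlib
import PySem

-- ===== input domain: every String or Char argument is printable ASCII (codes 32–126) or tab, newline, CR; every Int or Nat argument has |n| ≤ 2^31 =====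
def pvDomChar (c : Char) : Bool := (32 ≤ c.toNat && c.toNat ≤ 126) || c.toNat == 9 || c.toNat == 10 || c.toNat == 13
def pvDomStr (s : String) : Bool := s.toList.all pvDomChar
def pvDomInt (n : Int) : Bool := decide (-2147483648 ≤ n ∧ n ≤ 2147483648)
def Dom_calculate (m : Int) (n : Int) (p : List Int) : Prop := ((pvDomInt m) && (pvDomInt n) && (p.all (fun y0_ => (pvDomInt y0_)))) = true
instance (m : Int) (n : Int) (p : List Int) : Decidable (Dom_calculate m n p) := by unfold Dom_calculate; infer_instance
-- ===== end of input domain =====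

-- B replaces A's branching recursion over (m,n) states by a bottom-up DP keeping one reward row per remaining-day count (objective: alternative).

-- ===== PORT A =====
-- A recurses with m decreasing by 1 until m = -1; ported with fuel (m+1).toNat,
-- exact for every m ≥ -1 (for m < -1 the Python recursion never terminates; excluded by Pre_).
def calcAuxA : Nat → Int → List Int → Int
  | 0, _, _ => 0
  | k + 1, n, p =>
    if n = PySem.List.len p then calcAuxA k 0 p
    else if n = PySem.List.len p - 1 then calcAuxA k 0 p + PySem.List.pyGetD p n 0
    else max (calcAuxA k 0 p) (calcAuxA k (n + 1) p + PySem.List.pyGetD p n 0)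

def calculate (m : Int) (n : Int) (p : List Int) : Int := calcAuxA (m + 1).toNat n p

-- ===== PORT B =====
-- one pass of Source B's list comprehension: the new DP row built from the previous one
def stepRow (p : List Int) (row : List Int) : List Int :=
  let L : Int := PySem.List.len p
  let g : Int := PySem.List.pyGetD row 0 0
  (PySem.List.pyRange 0 (L + 1) 1).map (fun i =>
    if i = L then g
    else if i = L - 1 then g + PySem.List.pyGetD p (L - 1) 0
    else max g (PySem.List.pyGetD row (i + 1) 0 + PySem.List.pyGetD p i 0))

def calculate_alt (m : Int) (n : Int) (p : List Int) : Int :=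
  let row := (PySem.List.pyRange 0 (m + 1) 1).foldl (fun r _ => stepRow p r)
    (List.replicate (p.length + 1) 0)
  PySem.List.pyGetD row n 0

-- ===== PRECONDITION & SPEC =====
-- Pre_ keeps the natural state space: m ≥ -1 (for m < -1 A's recursion never terminates,
-- RecursionError) and 0 ≤ n ≤ len(p) (for n > len(p) A raises IndexError; negative n is
-- outside the natural domain — A only returns there via negative-index wraparound); the
-- m = -1 disjunct keeps the harmless wrapped indices on which both programs return 0.
def Pre_calculate (m : Int) (n : Int) (p : List Int) : Prop :=
  -1 ≤ m ∧ n ≤ (p.length : Int) ∧ (0 ≤ n ∨ (m = -1 ∧ -((p.length : Int) + 1) ≤ n))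
instance (m : Int) (n : Int) (p : List Int) : Decidable (Pre_calculate m n p) := by
  unfold Pre_calculate; infer_instance

def pvWitness_calculate : Int × Int × List Int := (2, 0, [1, 2])

def Spec_calculate (m : Int) (n : Int) (p : List Int) (out : Int) : Prop := out = calculate_alt m n p
instance (m : Int) (n : Int) (p : List Int) (out : Int) : Decidable (Spec_calculate m n p out) := by unfold Spec_calculate; infer_instance

-- ===== CLAIM (what is proved, stated in full; the proofs are below) =====
def Claim_equal_calculate : Prop := ∀ (m : Int) (n : Int) (p : List Int), Dom_calculate m n p → Pre_calculate m n p → Spec_calculate m n p (calculate m n p)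

-- ===== LEMMAS AND PROOFS =====

-- the DP row after k updates
def iterRow (p : List Int) (k : Nat) : List Int :=
  (stepRow p)^[k] (List.replicate (p.length + 1) 0)

theorem foldl_const_iterate {α β : Type} (f : α → α) (l : List β) (init : α) :
    l.foldl (fun r _ => f r) init = f^[l.length] init := by
  induction l generalizing init with
  | nil => rfl
  | cons x xs ih => simp [List.foldl_cons, ih, Function.iterate_succ_apply]

theorem pyGetD_replicate_zero (k : Nat) (n : Int) :
    PySem.List.pyGetD (List.replicate k (0 : Int)) n 0 = 0 := by
  simp only [PySem.List.pyGetD, PySem.List.pyGet?, PySem.List.pyIdx?]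
  split_ifs <;> simp

theorem calcAuxA_eq_row (p : List Int) (k : Nat) :
    ∀ n : Int, 0 ≤ n → n ≤ (p.length : Int) →
      calcAuxA k n p = PySem.List.pyGetD (iterRow p k) n 0 := by
  induction k with
  | zero =>
    intro n h0 hL
    simp only [calcAuxA, iterRow, Function.iterate_zero, id]
    exact (pyGetD_replicate_zero _ _).symm
  | succ k ih =>
    intro n h0 hL
    have hrow : iterRow p (k + 1) = stepRow p (iterRow p k) := by
      simp [iterRow, Function.iterate_succ_apply']
    rw [hrow]
    simp only [stepRow, PySem.List.len_eq]
    have hlt : n < (p.length : Int) + 1 := by omega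
    rw [PySem.List.pyGetD_map_pyRange_of_nonneg _ _ _ _ h0 hlt]
    have hz : (0 : Int) ≤ (p.length : Int) := by omega
    have hg := ih 0 le_rfl hz
    by_cases h1 : n = (p.length : Int)
    · simp only [calcAuxA, PySem.List.len_eq, if_pos h1]
      exact hg
    · by_cases h2 : n = (p.length : Int) - 1
      · simp only [calcAuxA, PySem.List.len_eq, if_neg h1, if_pos h2]
        rw [hg, h2]
      · have h0' : (0 : Int) ≤ n + 1 := by omega
        have hL' : n + 1 ≤ (p.length : Int) := by omega
        have hn := ih (n + 1) h0' hL'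
        simp only [calcAuxA, PySem.List.len_eq, if_neg h1, if_neg h2]
        rw [hg, hn]

-- ===== VERDICT (by name: the statement is the Claim_ definition above) =====
theorem calculate_spec : Claim_equal_calculate := by
  intro m n p _ hpre
  obtain ⟨hm, hL, hor⟩ := hpre
  show calculate m n p = calculate_alt m n p
  simp only [calculate, calculate_alt]
  rw [foldl_const_iterate, PySem.List.length_pyRange_one]
  have h : (m + 1 - 0).toNat = (m + 1).toNat := by omega
  rw [h]
  by_cases h0 : 0 ≤ n
  · exact calcAuxA_eq_row p (m + 1).toNat n h0 hL
  · have hm1 : m = -1 := ((hor.resolve_left h0).1)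
    subst hm1
    have hz : ((-1 : Int) + 1).toNat = 0 := by omega
    rw [hz]
    simp only [calcAuxA, Function.iterate_zero, id]
    exact (pyGetD_replicate_zero _ _).symm
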